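-- pv_equiv track=rewrite | github.com/federal-geospatial-platform/fgp-metadata-proxy | FME_files/FME_Custom_Transformers/Python/Catalogue_Reader.py | calculate_start_max_record
-- ===== SOURCE A (Python) =====
-- MAX_RECORD_READ = 50
--
-- def calculate_start_max_record(nbr_records):
--     """This method calculates the number and the start position of the records to read for each iteration.
--
--     Parameters
--     ----------
--     nbr_records: int
--         Total number of records to read
--
--     Returns
--     -------
--     List of tuple (int,int)
--         For each tuple, the first value is the position to read; the second value,
--         the number of record to read. If there is no record to read it returns an empty list []
--     """
--
--     if nbr_records == 0:
--        # There is no records to read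
--        lst_start_max = []
--
--     else:
--         # There is one or more record to read
--         nbr_loops = nbr_records//MAX_RECORD_READ
--         remaining = nbr_records%MAX_RECORD_READ
--
--         lst_start_max = [(i*MAX_RECORD_READ, MAX_RECORD_READ) for i in range(nbr_loops)]
--
--         if remaining != 0:
--            lst_start_max.append((nbr_loops*MAX_RECORD_READ, remaining))
--
--         if len(lst_start_max) == 0:
--             lst_start_max = [(0,0)]
--
--     return lst_start_max
-- ===== SOURCE B (Python) =====
-- MAX_RECORD_READ = 50
--
-- def calculate_start_max_record(nbr_records):
--     result = []
--     for pos in range(0, nbr_records, MAX_RECORD_READ):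
--         result.append((pos, min(MAX_RECORD_READ, nbr_records - pos)))
--     return result
-- ===== Notes on version B (the rewrite author's own statement) =====
-- stated objective: idiomatic
-- what changed: B iterates the chunk start positions directly with range(0, nbr_records, 50) and appends (pos, min(50, nbr_records - pos)), replacing A's precomputed quotient/remainder, comprehension and conditional tail append; Pre_ excludes negative record counts, outside the task's natural domain, where A's floor division yields a nonsensical negative-start chunk while B naturally returns [].
-- outside the precondition, e.g. on calculate_start_max_record(-1): A returns [(-50, 49)], B returns []; on calculate_start_max_record(-50): A returns [(0, 0)], B returns []
import Mathlib
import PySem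

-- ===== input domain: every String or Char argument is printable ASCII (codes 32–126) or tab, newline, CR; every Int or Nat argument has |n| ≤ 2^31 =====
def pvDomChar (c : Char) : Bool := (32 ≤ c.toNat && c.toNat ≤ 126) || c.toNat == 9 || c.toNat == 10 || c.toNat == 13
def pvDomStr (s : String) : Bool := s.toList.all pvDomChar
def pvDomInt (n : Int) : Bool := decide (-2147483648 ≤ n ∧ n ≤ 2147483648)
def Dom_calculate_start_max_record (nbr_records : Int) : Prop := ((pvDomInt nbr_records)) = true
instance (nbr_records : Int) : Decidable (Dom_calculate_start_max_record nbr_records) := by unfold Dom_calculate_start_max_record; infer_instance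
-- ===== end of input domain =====

-- B iterates the chunk start positions directly with a strided range and min, replacing A's
-- quotient/remainder precomputation with comprehension plus conditional tail append (idiomatic; same cost).

-- ===== PORT A =====
def calculate_start_max_record (nbr_records : Int) : List (Int × Int) :=
  if nbr_records == 0 then
    []
  else
    let nbr_loops := PySem.Int.floordiv nbr_records 50
    let remaining := PySem.Int.mod nbr_records 50
    let lst_start_max := (PySem.List.pyRange 0 nbr_loops 1).map (fun i => (i * 50, (50 : Int)))
    let lst_start_max :=
      if remaining != 0 then lst_start_max ++ [(nbr_loops * 50, remaining)] else lst_start_max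
    if lst_start_max.length == 0 then [((0 : Int), (0 : Int))] else lst_start_max

-- ===== PORT B =====
def calculate_start_max_record_alt (nbr_records : Int) : List (Int × Int) :=
  (PySem.List.pyRange 0 nbr_records 50).foldl
    (fun acc pos => acc ++ [(pos, min 50 (nbr_records - pos))]) []

-- ===== PRECONDITION & SPEC =====
-- Pre_ excludes negative record counts, outside the task's natural domain, where A's floor
-- division yields a nonsensical negative-start chunk (e.g. [(-50, 49)] for -1) while B returns [].
def Pre_calculate_start_max_record (nbr_records : Int) : Prop := 0 ≤ nbr_records
instance (nbr_records : Int) : Decidable (Pre_calculate_start_max_record nbr_records) := by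
  unfold Pre_calculate_start_max_record; infer_instance

def pvWitness_calculate_start_max_record : Int := 120

def Spec_calculate_start_max_record (nbr_records : Int) (out : List (Int × Int)) : Prop := out = calculate_start_max_record_alt nbr_records
instance (nbr_records : Int) (out : List (Int × Int)) : Decidable (Spec_calculate_start_max_record nbr_records out) := by unfold Spec_calculate_start_max_record; infer_instance

-- ===== CLAIM (what is proved, stated in full; the proofs are below) =====
def Claim_equal_calculate_start_max_record : Prop := ∀ (nbr_records : Int), Dom_calculate_start_max_record nbr_records → Pre_calculate_start_max_record nbr_records → Spec_calculate_start_max_record nbr_records (calculate_start_max_record nbr_records)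

-- ===== LEMMAS AND PROOFS =====

-- B unfolded: a map of the chunk function over the strided start positions.
theorem alt_eq_map (n : Int) :
    calculate_start_max_record_alt n =
      (List.range (if (0:Int) < n then ((n + 49) / 50).toNat else 0)).map
        (fun (k : Nat) => (50 * (k : Int), min 50 (n - 50 * (k : Int)))) := by
  unfold calculate_start_max_record_alt
  rw [PySem.List.pyRange_of_pos 0 n (by norm_num : (0:Int) < 50),
      PySem.List.foldl_append_singleton_eq_map, List.map_map, List.nil_append]
  have h : n - 0 + 50 - 1 = n + 49 := by ring
  rw [h]
  refine List.map_congr_left ?_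
  intro k _
  simp only [Function.comp_apply, zero_add]

theorem main_eq (n : Int) (hn : 0 ≤ n) :
    calculate_start_max_record n = calculate_start_max_record_alt n := by
  rw [alt_eq_map]
  rcases eq_or_lt_of_le hn with h0 | hpos
  · subst h0; simp [calculate_start_max_record]
  · have hne : (n == 0) = false := by simp; omega
    rw [if_pos hpos]
    simp only [calculate_start_max_record, hne, Bool.false_eq_true, if_false,
      PySem.Int.floordiv_eq_ediv_of_pos (by norm_num : (0:Int) < 50),
      PySem.Int.mod_eq_emod_of_pos (by norm_num : (0:Int) < 50),
      PySem.List.pyRange_one]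
    have hq : (n / 50 - 0).toNat = (n / 50).toNat := by omega
    rw [hq]
    by_cases hr : n % 50 = 0
    · -- no remainder: exactly n/50 full chunks
      have hcnt : ((n + 49) / 50).toNat = (n / 50).toNat := by omega
      rw [if_neg (by simp [hr] : ¬ (n % 50 != 0) = true), hcnt]
      have hq1 : 1 ≤ n / 50 := by omega
      rw [if_neg (by simp; omega : ¬ _ )]
      rw [List.map_map]
      refine List.map_congr_left ?_
      intro k hk
      simp only [List.mem_range] at hk
      have hk' : (k : Int) < n / 50 := by omega
      have hmin : min (50:Int) (n - 50 * (k:Int)) = 50 := by omega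
      simp only [Function.comp_apply, hmin, Prod.mk.injEq]
      exact ⟨by ring, trivial⟩
    · -- remainder: n/50 full chunks plus one short final chunk
      have hcnt : ((n + 49) / 50).toNat = (n / 50).toNat + 1 := by omega
      rw [if_pos (by simp [hr] : (n % 50 != 0) = true), hcnt]
      rw [if_neg (by simp : ¬ _ )]
      rw [List.range_succ, List.map_append, List.map_map]
      congr 1
      · refine List.map_congr_left ?_
        intro k hk
        simp only [List.mem_range] at hk
        have hk' : (k : Int) < n / 50 := by omega
        have hmin : min (50:Int) (n - 50 * (k:Int)) = 50 := by omega
        simp only [Function.comp_apply, hmin, Prod.mk.injEq]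
        exact ⟨by ring, trivial⟩
      · have hcast : (((n / 50).toNat : Int)) = n / 50 := by omega
        have hmin : min (50:Int) (n - 50 * (n / 50)) = n % 50 := by omega
        simp only [List.map_cons, List.map_nil, hcast, hmin, Prod.mk.injEq,
          List.cons.injEq, and_true]
        ring

-- ===== VERDICT (by name: the statement is the Claim_ definition above) =====
theorem calculate_start_max_record_spec : Claim_equal_calculate_start_max_record := by
  intro n _ hpre
  exact main_eq n hpre
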